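-- pv_equiv track=rewrite | github.com/FluffyP4nd4/data-etl | utils/extract.py | process_points
-- ===== SOURCE A (Python) =====
-- def process_points(points):
--     x=[]
--     y=[]
--     for i in range(len(points)):
--         if i%2==0:
--             x.append(points[i])
--         else:
--             y.append(points[i])
--
--     pts =[]
--     for i,j in zip(x,y):
--         pts.append([i,j])
--
--     return pts
-- ===== SOURCE B (Python) =====
-- def process_points(points):
--     it = iter(points)
--     return [[a, b] for a, b in zip(it, it)]
-- ===== Notes on version B (the rewrite author's own statement) =====
-- stated objective: idiomatic
-- what changed: B pairs consecutive elements in one pass with the zip(it, it) grouper idiom instead of splitting into separate even/odd-index lists and then zipping them back together.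
import Mathlib
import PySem

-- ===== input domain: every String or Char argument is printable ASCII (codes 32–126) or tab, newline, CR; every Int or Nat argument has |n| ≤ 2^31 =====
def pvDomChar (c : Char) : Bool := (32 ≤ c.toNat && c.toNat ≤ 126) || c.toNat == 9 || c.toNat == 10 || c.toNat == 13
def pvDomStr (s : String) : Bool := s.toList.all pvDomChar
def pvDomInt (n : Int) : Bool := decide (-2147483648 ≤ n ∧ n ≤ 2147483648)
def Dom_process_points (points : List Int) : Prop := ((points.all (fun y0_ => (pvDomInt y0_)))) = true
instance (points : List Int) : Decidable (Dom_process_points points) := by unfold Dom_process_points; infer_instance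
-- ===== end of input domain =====

-- B pairs consecutive elements in one pass (Python's zip(it, it) grouper idiom) instead of
-- splitting into even/odd-index lists and zipping them back; objective: idiomatic.

-- ===== PORT A =====
-- literal port of A: first loop over range(len(points)) splitting into x/y by index parity
-- (the index is always in range, so pyGetD with default 0 equals points[i]); then a zip loop.
def process_points (points : List Int) : List (List Int) :=
  let xy := (PySem.List.pyRange 0 (points.length : Int) 1).foldl
      (fun (st : List Int × List Int) i =>
        if i % 2 == 0 then (st.1 ++ [PySem.List.pyGetD points i 0], st.2)
        else (st.1, st.2 ++ [PySem.List.pyGetD points i 0])) ([], [])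
  (xy.1.zip xy.2).foldl (fun pts p => pts ++ [[p.1, p.2]]) []

-- ===== PORT B =====
-- zip(it, it) over a single iterator consumes the list two elements at a time
def process_points_alt : List Int → List (List Int)
  | a :: b :: rest => [a, b] :: process_points_alt rest
  | _ => []

-- ===== PRECONDITION & SPEC =====
def Spec_process_points (points : List Int) (out : List (List Int)) : Prop := out = process_points_alt points
instance (points : List Int) (out : List (List Int)) : Decidable (Spec_process_points points out) := by unfold Spec_process_points; infer_instance

-- ===== CLAIM (what is proved, stated in full; the proofs are below) =====
def Claim_equal_process_points : Prop := ∀ (points : List Int), Dom_process_points points → Spec_process_points points (process_points points)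

-- ===== LEMMAS AND PROOFS =====

mutual
def pvEvens : List Int → List Int
  | [] => []
  | a :: l => a :: pvOdds l
def pvOdds : List Int → List Int
  | [] => []
  | _ :: l => pvEvens l
end

-- A's first loop, seen over enumerate: splits into evens/odds (parity of the start index decides which side)
theorem pv_split_loop (l : List Int) : ∀ (s : Int) (x y : List Int),
    (PySem.List.enumerate l s).foldl
      (fun (st : List Int × List Int) p =>
        if p.1 % 2 == 0 then (st.1 ++ [p.2], st.2) else (st.1, st.2 ++ [p.2])) (x, y)
    = if s % 2 == 0 then (x ++ pvEvens l, y ++ pvOdds l) else (x ++ pvOdds l, y ++ pvEvens l) := by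
  induction l with
  | nil => intro s x y; simp [PySem.List.enumerate_nil, pvEvens, pvOdds]
  | cons a l ih =>
    intro s x y
    rw [PySem.List.enumerate_cons, List.foldl_cons]
    by_cases h : s % 2 = 0
    · have hb : (s % 2 == 0) = true := by simpa using h
      have hb1 : ((s + 1) % 2 == 0) = false := by simp; omega
      simp only [hb, hb1, if_true, if_false, Bool.false_eq_true, ih]
      simp [pvEvens, pvOdds]
    · have hb : (s % 2 == 0) = false := by simpa using h
      have hb1 : ((s + 1) % 2 == 0) = true := by simp; omega
      simp only [hb, hb1, if_true, if_false, Bool.false_eq_true, ih]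
      simp [pvEvens, pvOdds]

theorem pv_zip_evens_odds : (l : List Int) →
    ((pvEvens l).zip (pvOdds l)).map (fun p => [p.1, p.2]) = process_points_alt l
  | [] => rfl
  | [_] => rfl
  | a :: b :: rest => by
      simp [pvEvens, pvOdds, process_points_alt, pv_zip_evens_odds rest]

-- ===== VERDICT (by name: the statement is the Claim_ definition above) =====
theorem process_points_spec : Claim_equal_process_points := by
  intro points _
  unfold Spec_process_points process_points
  rw [show (PySem.List.pyRange 0 (points.length : Int) 1).foldl
        (fun (st : List Int × List Int) i =>
          if i % 2 == 0 then (st.1 ++ [PySem.List.pyGetD points i 0], st.2)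
          else (st.1, st.2 ++ [PySem.List.pyGetD points i 0])) ([], [])
      = (PySem.List.enumerate points 0).foldl
        (fun (st : List Int × List Int) p =>
          if p.1 % 2 == 0 then (st.1 ++ [p.2], st.2) else (st.1, st.2 ++ [p.2])) ([], [])
      from by rw [PySem.List.enumerate_eq_map_pyRange (d := 0), List.foldl_map]; rfl]
  rw [pv_split_loop points 0 [] []]
  simp only [show ((0 : Int) % 2 == 0) = true from rfl, if_true, List.nil_append]
  rw [PySem.List.foldl_append_singleton_eq_map, List.nil_append, pv_zip_evens_odds]
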